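-- pv_equiv track=rewrite | github.com/Abhishek2668/DataEnvironment | forex_bot/forex_app/news.py | _tag_symbols
-- ===== SOURCE A (Python) =====
-- SYMBOLS = ["USD", "CAD", "EUR", "GBP", "JPY", "AUD", "CHF", "NZD"]
--
-- def _tag_symbols(text: str) -> list[str]:
--     tokens = text.upper().split()
--     tags = set()
--     for base in SYMBOLS:
--         for quote in SYMBOLS:
--             if base == quote:
--                 continue
--             pair = f"{base}/{quote}"
--             if base in tokens and quote in tokens:
--                 tags.add(pair)
--     return sorted(tags)
-- ===== SOURCE B (Python) =====
-- SYMBOLS = ["USD", "CAD", "EUR", "GBP", "JPY", "AUD", "CHF", "NZD"]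
--
--
-- def _tag_symbols(text: str) -> list[str]:
--     # Single streaming pass over the tokens: each time a symbol appears for
--     # the first time, tag it both ways against every symbol seen before it.
--     seen = []
--     tags = set()
--     for tok in text.upper().split():
--         if tok in SYMBOLS and tok not in seen:
--             for prev in seen:
--                 tags.add(f"{tok}/{prev}")
--                 tags.add(f"{prev}/{tok}")
--             seen.append(tok)
--     return sorted(tags)
-- ===== Notes on version B (the rewrite author's own statement) =====
-- stated objective: alternative
-- what changed: Replaces A's fixed 64-pair double loop over SYMBOLS (with a token-list membership scan per pair) by a single streaming pass over the tokens: an incremental accumulator of symbols seen so far, pairing each newly seen symbol both ways with every earlier one.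
import Mathlib
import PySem

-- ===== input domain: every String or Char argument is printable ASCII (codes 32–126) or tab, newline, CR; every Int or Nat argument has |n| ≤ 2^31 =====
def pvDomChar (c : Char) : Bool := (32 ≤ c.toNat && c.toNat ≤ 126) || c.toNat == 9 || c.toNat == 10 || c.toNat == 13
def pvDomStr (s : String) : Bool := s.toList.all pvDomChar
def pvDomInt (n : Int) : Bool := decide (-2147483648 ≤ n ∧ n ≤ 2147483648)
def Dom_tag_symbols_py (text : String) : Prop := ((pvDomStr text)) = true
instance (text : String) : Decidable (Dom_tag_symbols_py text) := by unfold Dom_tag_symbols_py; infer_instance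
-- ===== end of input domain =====

-- B replaces A's fixed 64-pair double loop over SYMBOLS by a single streaming pass over the
-- tokens, pairing each newly seen symbol with every symbol seen before it: a different algorithm.


-- ===== PORT A =====
def pySYMBOLS : List String := ["USD", "CAD", "EUR", "GBP", "JPY", "AUD", "CHF", "NZD"]

-- Python's sorted on strings is code-point lexicographic; ported via the `.toList` key.
def tag_symbols_py (text : String) : List String :=
  let tokens := PySem.Str.split₀ (PySem.Str.upper text)
  let tags : PySem.Set String :=
    pySYMBOLS.foldl (fun tags base =>
      pySYMBOLS.foldl (fun tags quote =>
        if base == quote then tags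
        else if tokens.contains base && tokens.contains quote then
          PySem.Set.add tags (base ++ "/" ++ quote)
        else tags) tags) PySem.Set.empty
  PySem.List.sorted tags (fun x => x.toList) false

-- ===== PORT B =====
-- One fold over the tokens; state = (seen symbols in first-occurrence order, tag set).
def tag_symbols_py_alt (text : String) : List String :=
  let st := (PySem.Str.split₀ (PySem.Str.upper text)).foldl
    (fun (st : List String × PySem.Set String) tok =>
      if pySYMBOLS.contains tok && !(st.1.contains tok) then
        (st.1 ++ [tok],
         st.1.foldl (fun t prev =>
           PySem.Set.add (PySem.Set.add t (tok ++ "/" ++ prev)) (prev ++ "/" ++ tok)) st.2)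
      else st) ([], PySem.Set.empty)
  PySem.List.sorted st.2 (fun x => x.toList) false

-- ===== PRECONDITION & SPEC =====
def Spec_tag_symbols_py (text : String) (out : List String) : Prop := out = tag_symbols_py_alt text
instance (text : String) (out : List String) : Decidable (Spec_tag_symbols_py text out) := by unfold Spec_tag_symbols_py; infer_instance

-- ===== CLAIM (what is proved, stated in full; the proofs are below) =====
def Claim_equal_tag_symbols_py : Prop := ∀ (text : String), Dom_tag_symbols_py text → Spec_tag_symbols_py text (tag_symbols_py text)

-- ===== LEMMAS AND PROOFS =====

-- A's inner loop: membership characterisation.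
theorem mem_innerA (tokens : List String) (base : String) (l : List String)
    (tags : PySem.Set String) (y : String) :
    (y ∈ l.foldl (fun tags quote =>
        if base == quote then tags
        else if tokens.contains base && tokens.contains quote then
          PySem.Set.add tags (base ++ "/" ++ quote)
        else tags) tags) ↔
      y ∈ tags ∨ ∃ q ∈ l, base ≠ q ∧ base ∈ tokens ∧ q ∈ tokens ∧
        y = base ++ "/" ++ q := by
  induction l generalizing tags with
  | nil => simp
  | cons q l ih =>
    simp only [List.foldl_cons]
    split_ifs with h1 h2
    · rw [ih]; simp at h1; subst h1; aesop
    · rw [ih, PySem.Set.mem_add]; simp at h1 h2; aesop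
    · rw [ih]; simp at h1 h2; aesop

theorem nodup_innerA (tokens : List String) (base : String) (l : List String)
    (tags : PySem.Set String) (h : tags.Nodup) :
    (l.foldl (fun tags quote =>
        if base == quote then tags
        else if tokens.contains base && tokens.contains quote then
          PySem.Set.add tags (base ++ "/" ++ quote)
        else tags) tags).Nodup := by
  induction l generalizing tags with
  | nil => exact h
  | cons q l ih =>
    simp only [List.foldl_cons]
    split_ifs
    · exact ih _ h
    · exact ih _ (PySem.Set.nodup_add _ _ h)
    · exact ih _ h

-- A's outer loop: membership characterisation.
theorem mem_outerA (tokens : List String) (l : List String)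
    (tags : PySem.Set String) (y : String) :
    (y ∈ l.foldl (fun tags base =>
        pySYMBOLS.foldl (fun tags quote =>
          if base == quote then tags
          else if tokens.contains base && tokens.contains quote then
            PySem.Set.add tags (base ++ "/" ++ quote)
          else tags) tags) tags) ↔
      y ∈ tags ∨ ∃ a ∈ l, ∃ q ∈ pySYMBOLS, a ≠ q ∧ a ∈ tokens ∧ q ∈ tokens ∧
        y = a ++ "/" ++ q := by
  induction l generalizing tags with
  | nil => simp
  | cons b l ih =>
    simp only [List.foldl_cons]
    rw [ih]
    constructor
    · rintro (h | ⟨a, ha, q, hq, hne, h1, h2, hy⟩)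
      · rw [mem_innerA] at h
        rcases h with h | ⟨q, hq, hne, h1, h2, hy⟩
        · tauto
        · exact Or.inr ⟨b, by simp, q, hq, hne, h1, h2, hy⟩
      · exact Or.inr ⟨a, by simp [ha], q, hq, hne, h1, h2, hy⟩
    · rintro (h | ⟨a, ha, q, hq, hne, h1, h2, hy⟩)
      · exact Or.inl ((mem_innerA _ _ _ _ _).2 (Or.inl h))
      · rcases List.mem_cons.1 ha with rfl | ha
        · exact Or.inl ((mem_innerA _ _ _ _ _).2 (Or.inr ⟨q, hq, hne, h1, h2, hy⟩))
        · exact Or.inr ⟨a, ha, q, hq, hne, h1, h2, hy⟩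

theorem nodup_outerA (tokens : List String) (l : List String)
    (tags : PySem.Set String) (h : tags.Nodup) :
    (l.foldl (fun tags base =>
        pySYMBOLS.foldl (fun tags quote =>
          if base == quote then tags
          else if tokens.contains base && tokens.contains quote then
            PySem.Set.add tags (base ++ "/" ++ quote)
          else tags) tags) tags).Nodup := by
  induction l generalizing tags with
  | nil => exact h
  | cons b l ih => exact ih _ (nodup_innerA _ _ _ _ h)

-- B's inner loop: membership characterisation and Nodup.
theorem mem_innerB (tok : String) (seen : List String) (t : PySem.Set String) (y : String) :
    (y ∈ seen.foldl (fun t prev =>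
        PySem.Set.add (PySem.Set.add t (tok ++ "/" ++ prev)) (prev ++ "/" ++ tok)) t) ↔
      y ∈ t ∨ ∃ p ∈ seen, y = tok ++ "/" ++ p ∨ y = p ++ "/" ++ tok := by
  induction seen generalizing t with
  | nil => simp
  | cons p seen ih =>
    simp only [List.foldl_cons]
    rw [ih]
    simp [PySem.Set.mem_add]
    aesop

theorem nodup_innerB (tok : String) (seen : List String) (t : PySem.Set String)
    (h : t.Nodup) :
    (seen.foldl (fun t prev =>
        PySem.Set.add (PySem.Set.add t (tok ++ "/" ++ prev)) (prev ++ "/" ++ tok)) t).Nodup := by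
  induction seen generalizing t with
  | nil => exact h
  | cons p seen ih => exact ih _ (PySem.Set.nodup_add _ _ (PySem.Set.nodup_add _ _ h))

-- B's main fold invariant.
theorem B_fold_inv (ts : List String) : ∀ (seen : List String) (tags : PySem.Set String),
    tags.Nodup →
    (∀ x ∈ seen, x ∈ pySYMBOLS) →
    (∀ y, y ∈ tags ↔ ∃ a ∈ seen, ∃ b ∈ seen, a ≠ b ∧ y = a ++ "/" ++ b) →
    (let st := ts.foldl (fun (st : List String × PySem.Set String) tok =>
        if pySYMBOLS.contains tok && !(st.1.contains tok) then
          (st.1 ++ [tok],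
           st.1.foldl (fun t prev =>
             PySem.Set.add (PySem.Set.add t (tok ++ "/" ++ prev)) (prev ++ "/" ++ tok)) st.2)
        else st) (seen, tags)
     st.2.Nodup ∧ (∀ x, x ∈ st.1 ↔ x ∈ seen ∨ (x ∈ pySYMBOLS ∧ x ∈ ts)) ∧
       (∀ y, y ∈ st.2 ↔ ∃ a ∈ st.1, ∃ b ∈ st.1, a ≠ b ∧ y = a ++ "/" ++ b)) := by
  induction ts with
  | nil =>
    intro seen tags hnd _ hchar
    simp only [List.foldl_nil]
    exact ⟨hnd, by simp, hchar⟩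
  | cons t ts ih =>
    intro seen tags hnd hsub hchar
    simp only [List.foldl_cons]
    by_cases hc : (pySYMBOLS.contains t && !(seen.contains t)) = true
    · simp only [hc, if_pos]
      simp only [Bool.and_eq_true, Bool.not_eq_eq_eq_not, Bool.not_true,
        List.contains_eq_mem, decide_eq_true_eq, decide_eq_false_iff_not] at hc
      obtain ⟨htSym, htNew⟩ := hc
      have hchar' : ∀ y, (y ∈ seen.foldl (fun t' prev =>
          PySem.Set.add (PySem.Set.add t' (t ++ "/" ++ prev)) (prev ++ "/" ++ t)) tags) ↔
          ∃ a ∈ seen ++ [t], ∃ b ∈ seen ++ [t], a ≠ b ∧ y = a ++ "/" ++ b := by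
        intro y
        rw [mem_innerB]
        constructor
        · rintro (h | ⟨p, hp, (rfl | rfl)⟩)
          · rw [hchar] at h
            obtain ⟨a, ha, b, hb, hne, hy⟩ := h
            exact ⟨a, by simp [ha], b, by simp [hb], hne, hy⟩
          · exact ⟨t, by simp, p, by simp [hp], fun h => htNew (h ▸ hp), rfl⟩
          · exact ⟨p, by simp [hp], t, by simp, fun h => htNew (h ▸ hp), rfl⟩
        · rintro ⟨a, ha, b, hb, hne, rfl⟩
          simp only [List.mem_append, List.mem_singleton] at ha hb
          rcases ha with ha | rfl
          · rcases hb with hb | rfl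
            · exact Or.inl ((hchar _).2 ⟨a, ha, b, hb, hne, rfl⟩)
            · exact Or.inr ⟨a, ha, Or.inr rfl⟩
          · rcases hb with hb | rfl
            · exact Or.inr ⟨b, hb, Or.inl rfl⟩
            · exact absurd rfl hne
      have := ih (seen ++ [t]) _ (nodup_innerB _ _ _ hnd)
        (by intro x hx; rcases List.mem_append.1 hx with h | h
            · exact hsub x h
            · simp at h; subst h; exact htSym) hchar'
      obtain ⟨h1, h2, h3⟩ := this
      refine ⟨h1, ?_, h3⟩
      intro x
      rw [h2]
      simp only [List.mem_append, List.mem_cons, List.not_mem_nil, or_false]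
      constructor
      · rintro ((h | rfl) | ⟨hs, hm⟩)
        · exact Or.inl h
        · exact Or.inr ⟨htSym, Or.inl rfl⟩
        · exact Or.inr ⟨hs, Or.inr hm⟩
      · rintro (h | ⟨hs, (rfl | hm)⟩)
        · exact Or.inl (Or.inl h)
        · exact Or.inl (Or.inr rfl)
        · exact Or.inr ⟨hs, hm⟩
    · rw [if_neg hc]
      obtain ⟨h1, h2, h3⟩ := ih seen tags hnd hsub hchar
      refine ⟨h1, ?_, h3⟩
      intro x
      rw [h2]
      have hts : t ∈ pySYMBOLS → t ∈ seen := by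
        intro h; by_contra hn; exact hc (by simp [h, hn])
      constructor
      · rintro (h | ⟨hs, hm⟩)
        · exact Or.inl h
        · exact Or.inr ⟨hs, List.mem_cons_of_mem _ hm⟩
      · rintro (h | ⟨hs, hm⟩)
        · exact Or.inl h
        · rcases List.mem_cons.1 hm with rfl | hm
          · exact Or.inl (hts hs)
          · exact Or.inr ⟨hs, hm⟩

theorem string_toList_injective : Function.Injective (fun s : String => s.toList) := by
  intro a b h
  simpa using congrArg String.ofList h

-- The ports' `sorted` call elaborates with core's `LT (List Char)`; bridge it to the
-- (propositionally equal) Mathlib LinearOrder instance that the library lemmas are stated with.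
theorem sorted_inst_bridge (xs : List String) :
    PySem.List.sorted xs (fun x => x.toList) false =
    @PySem.List.sorted String (List Char)
      (@Preorder.toLT _ (@PartialOrder.toPreorder _ (@LinearOrder.toPartialOrder _ List.instLinearOrder)))
      (@LinearOrder.toDecidableLT _ List.instLinearOrder) xs (fun x => x.toList) false := by
  rw [@PySem.List.sorted_eq_foldl_insertBy String (List Char) List.instLT
        (fun a b => a.decidableLT b) xs (fun x => x.toList),
      @PySem.List.sorted_eq_foldl_insertBy String (List Char)
        (@Preorder.toLT _ (@PartialOrder.toPreorder _ (@LinearOrder.toPartialOrder _ List.instLinearOrder)))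
        (@LinearOrder.toDecidableLT _ List.instLinearOrder) xs (fun x => x.toList)]
  congr 1
  funext acc x
  congr 1
  funext a b
  exact decide_eq_decide.2 (List.lt_iff_lex_lt _ _)

-- ===== VERDICT (by name: the statement is the Claim_ definition above) =====
theorem final_aux (tokens : List String) :
    PySem.List.sorted
      (pySYMBOLS.foldl (fun tags base =>
        pySYMBOLS.foldl (fun tags quote =>
          if base == quote then tags
          else if tokens.contains base && tokens.contains quote then
            PySem.Set.add tags (base ++ "/" ++ quote)
          else tags) tags) PySem.Set.empty)
      (fun x => x.toList) false =
    PySem.List.sorted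
      (tokens.foldl (fun (st : List String × PySem.Set String) tok =>
        if pySYMBOLS.contains tok && !(st.1.contains tok) then
          (st.1 ++ [tok],
           st.1.foldl (fun t prev =>
             PySem.Set.add (PySem.Set.add t (tok ++ "/" ++ prev)) (prev ++ "/" ++ tok)) st.2)
        else st) ([], PySem.Set.empty)).2
      (fun x => x.toList) false := by
  obtain ⟨hBnd, hBseen, hBchar⟩ := B_fold_inv tokens [] PySem.Set.empty
    List.nodup_nil (by simp) (by simp [PySem.Set.empty])
  rw [sorted_inst_bridge, sorted_inst_bridge]
  apply PySem.List.sorted_eq_sorted_of_perm _ _ _ string_toList_injective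
  apply (List.perm_ext_iff_of_nodup
    (nodup_outerA tokens pySYMBOLS PySem.Set.empty List.nodup_nil) hBnd).2
  intro y
  rw [mem_outerA, hBchar]
  simp only [PySem.Set.empty, List.not_mem_nil, false_or]
  constructor
  · rintro ⟨a, ha, q, hq, hne, h1, h2, hy⟩
    exact ⟨a, (hBseen a).2 (Or.inr ⟨ha, h1⟩),
           q, (hBseen q).2 (Or.inr ⟨hq, h2⟩), hne, hy⟩
  · rintro ⟨a, ha, b, hb, hne, hy⟩
    rcases (hBseen a).1 ha with h | ⟨haS, haT⟩
    · simp at h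
    rcases (hBseen b).1 hb with h | ⟨hbS, hbT⟩
    · simp at h
    exact ⟨a, haS, b, hbS, hne, haT, hbT, hy⟩

theorem tag_symbols_py_spec : Claim_equal_tag_symbols_py := by
  intro text _
  show tag_symbols_py text = tag_symbols_py_alt text
  exact final_aux (PySem.Str.split₀ (PySem.Str.upper text))
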